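-- pv_equiv track=rewrite | github.com/MichaelLin12/Python | hw8/funny_puzzle.py | identify_empty
-- ===== SOURCE A (Python) =====
-- def identify_empty(state):
--     empty_1 = -1
--     empty_2 = -1
--
--     for i,j in enumerate(state):
--         if j != 0:
--             continue
--         if empty_1 == -1:
--             empty_1 = i
--         else:
--             empty_2 = i
--
--     return empty_1,empty_2
-- ===== SOURCE B (Python) =====
-- def identify_empty(state):
--     if 0 not in state:
--         return -1, -1
--     first = state.index(0)
--     last = len(state) - 1 - state[::-1].index(0)
--     return first, (last if last != first else -1)
-- ===== Notes on version B (the rewrite author's own statement) =====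
-- stated objective: alternative
-- what changed: B replaces A's single sentinel-threading loop by staged library searches: a membership test, state.index(0) for the first zero, and a reversed-list index for the last zero, with 'last != first' standing in for the two-zeros test.
import Mathlib
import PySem

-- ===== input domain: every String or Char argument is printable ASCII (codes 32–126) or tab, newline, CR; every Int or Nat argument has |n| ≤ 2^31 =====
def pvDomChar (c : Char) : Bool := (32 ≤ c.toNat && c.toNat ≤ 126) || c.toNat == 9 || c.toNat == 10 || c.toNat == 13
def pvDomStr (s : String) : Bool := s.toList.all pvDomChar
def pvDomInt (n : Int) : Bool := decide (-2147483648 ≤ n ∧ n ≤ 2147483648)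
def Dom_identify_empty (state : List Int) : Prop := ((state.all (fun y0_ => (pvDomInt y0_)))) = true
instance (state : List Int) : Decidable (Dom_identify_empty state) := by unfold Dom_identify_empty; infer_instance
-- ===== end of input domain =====

-- B replaces A's sentinel loop by staged library searches: membership test, index of the
-- first 0, index of the last 0 found by searching the reversed list (objective: alternative).

-- ===== PORT A =====
-- the body of A's for-loop: skip non-zeros, set empty_1 if still -1, else overwrite empty_2
def pvStep (acc : Int × Int) (ij : Int × Int) : Int × Int :=
  if ij.2 ≠ 0 then acc
  else if acc.1 == -1 then (ij.1, acc.2)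
  else (acc.1, ij.1)

def identify_empty (state : List Int) : Int × Int :=
  (PySem.List.enumerate state 0).foldl pvStep (-1, -1)

-- ===== PORT B =====
-- 'state.index(0)' / 'state[::-1].index(0)' are PySem.List.index?; Python would raise
-- ValueError on a missing element, but both calls sit under the '0 in state' guard, so the
-- Option is always some there and '.getD 0' is never the fallback.  'state[::-1]' is list
-- reversal, ported as List.reverse (exact).
def identify_empty_alt (state : List Int) : Int × Int :=
  if (0 : Int) ∉ state then (-1, -1)
  else
    let first : Int := ((PySem.List.index? state 0).getD 0 : Nat)
    let last : Int := (state.length : Int) - 1 - ((PySem.List.index? state.reverse 0).getD 0 : Nat)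
    (first, if last ≠ first then last else -1)

-- ===== PRECONDITION & SPEC =====
def Spec_identify_empty (state : List Int) (out : Int × Int) : Prop := out = identify_empty_alt state
instance (state : List Int) (out : Int × Int) : Decidable (Spec_identify_empty state out) := by unfold Spec_identify_empty; infer_instance

-- ===== CLAIM (what is proved, stated in full; the proofs are below) =====
def Claim_equal_identify_empty : Prop := ∀ (state : List Int), Dom_identify_empty state → Spec_identify_empty state (identify_empty state)

-- ===== LEMMAS AND PROOFS =====

-- the list of indices of zeros, as A's loop meets them
def pvZeros (l : List (Int × Int)) : List Int :=
  (l.filter (fun ij => ij.2 == 0)).map (fun ij => ij.1)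

-- once empty_1 is set (to a value ≠ -1) it never changes, and empty_2 tracks the last zero seen
lemma pvFold_set (l : List (Int × Int)) (a : Int) (ha : a ≠ -1) (b : Int) :
    l.foldl pvStep (a, b) = (a, (pvZeros l).getLastD b) := by
  induction l generalizing b with
  | nil => rfl
  | cons hd t ih =>
    by_cases h : hd.2 = 0
    · have hstep : pvStep (a, b) hd = (a, hd.1) := by simp [pvStep, h, ha]
      have hz : pvZeros (hd :: t) = hd.1 :: pvZeros t := by simp [pvZeros, h]
      rw [List.foldl_cons, hstep, ih, hz, List.getLastD_cons]
    · have hstep : pvStep (a, b) hd = (a, b) := by simp [pvStep, h]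
      have hz : pvZeros (hd :: t) = pvZeros t := by simp [pvZeros, h]
      rw [List.foldl_cons, hstep, ih, hz]

lemma pvFold_unset (l : List (Int × Int)) (hpos : ∀ p ∈ l, 0 ≤ p.1) :
    l.foldl pvStep (-1, -1) =
      (if pvZeros l ≠ [] then (pvZeros l).headD (-1) else -1,
       if 2 ≤ (pvZeros l).length then (pvZeros l).getLastD (-1) else -1) := by
  induction l with
  | nil => rfl
  | cons hd t ih =>
    by_cases h : hd.2 = 0
    · have hne : hd.1 ≠ -1 := by
        have := hpos hd (by simp)
        omega
      have hstep : pvStep (-1, -1) hd = (hd.1, -1) := by simp [pvStep, h]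
      have hz : pvZeros (hd :: t) = hd.1 :: pvZeros t := by simp [pvZeros, h]
      rw [List.foldl_cons, hstep, pvFold_set t hd.1 hne (-1), hz]
      cases hzt : pvZeros t with
      | nil => simp
      | cons z zs => simp
    · have hstep : pvStep (-1, -1) hd = (-1, -1) := by simp [pvStep, h]
      have hz : pvZeros (hd :: t) = pvZeros t := by simp [pvZeros, h]
      rw [List.foldl_cons, hstep, ih (fun p hp => hpos p (by simp [hp])), hz]

lemma pvEnum_pos (state : List Int) : ∀ p ∈ PySem.List.enumerate state 0, 0 ≤ p.1 := by
  intro p hp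
  rcases (PySem.List.mem_enumerate_iff _ _ _).mp hp with ⟨k, hk, rfl⟩
  simp

-- zero-index list is empty iff there is no zero
lemma pvZeros_nil_iff (s : List Int) (n : Int) :
    pvZeros (PySem.List.enumerate s n) = [] ↔ (0 : Int) ∉ s := by
  induction s generalizing n with
  | nil => simp [pvZeros, PySem.List.enumerate_nil]
  | cons x t ih =>
    by_cases h : x = 0
    · simp [pvZeros, PySem.List.enumerate_cons, h]
    · simpa [pvZeros, PySem.List.enumerate_cons, h, Ne.symm h] using ih (n + 1)

-- head of the zero-index list = n + index of the first zero
lemma pvZeros_head (s : List Int) (n d : Int) :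
    (pvZeros (PySem.List.enumerate s n)).headD d =
      (match PySem.List.index? s 0 with
       | some k => n + (k : Int)
       | none => d) := by
  induction s generalizing n with
  | nil => simp [pvZeros, PySem.List.enumerate_nil, PySem.List.index?]
  | cons x t ih =>
    by_cases h : x = 0
    · subst h
      rw [PySem.List.index?_cons_self]
      simp [pvZeros, PySem.List.enumerate_cons]
    · rw [PySem.List.index?_cons_of_ne _ h]
      have hz : pvZeros (PySem.List.enumerate (x :: t) n)
          = pvZeros (PySem.List.enumerate t (n + 1)) := by
        simp [pvZeros, PySem.List.enumerate_cons, h]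
      rw [hz, ih (n + 1)]
      cases PySem.List.index? t 0 with
      | none => simp
      | some k => simp only [Option.map_some]; push_cast; ring

-- last of the zero-index list = n + length - 1 - index of the first zero of the reversal
lemma pvZeros_last (s : List Int) (n d : Int) :
    (pvZeros (PySem.List.enumerate s n)).getLastD d =
      (match PySem.List.index? s.reverse 0 with
       | some k => n + (s.length : Int) - 1 - (k : Int)
       | none => d) := by
  induction s using List.reverseRecOn generalizing n with
  | nil => simp [pvZeros, PySem.List.enumerate_nil, PySem.List.index?]
  | append_singleton t x ih =>
    have henum : PySem.List.enumerate (t ++ [x]) n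
        = PySem.List.enumerate t n ++ [(n + t.length, x)] := by
      rw [PySem.List.enumerate_append]
      simp [PySem.List.enumerate_cons, PySem.List.enumerate_nil]
    by_cases h : x = 0
    · subst h
      rw [List.reverse_append]
      simp only [List.reverse_singleton, List.singleton_append]
      rw [PySem.List.index?_cons_self]
      have hz : pvZeros (PySem.List.enumerate (t ++ [(0:Int)]) n)
          = pvZeros (PySem.List.enumerate t n) ++ [n + t.length] := by
        rw [henum]; simp [pvZeros]
      rw [hz]
      simp
      ring_nf
    · rw [List.reverse_append]
      simp only [List.reverse_singleton, List.singleton_append]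
      rw [PySem.List.index?_cons_of_ne _ h]
      have hz : pvZeros (PySem.List.enumerate (t ++ [x]) n)
          = pvZeros (PySem.List.enumerate t n) := by
        rw [henum]; simp [pvZeros, h]
      rw [hz, ih n]
      cases PySem.List.index? t.reverse 0 with
      | none => simp
      | some k =>
        simp only [Option.map_some, List.length_append, List.length_cons, List.length_nil]
        push_cast; ring

-- the zero-index list is strictly increasing
lemma pvZeros_sorted (s : List Int) (n : Int) :
    (pvZeros (PySem.List.enumerate s n)).Pairwise (· < ·) := by
  have := PySem.List.pairwise_lt_enumerate s n
  exact (this.filter _).map _ (fun a b h => h)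

-- for a strictly increasing list, length ≥ 2 iff first and last differ
lemma pvLen2_iff (Z : List Int) (d : Int) (hZ : Z.Pairwise (· < ·)) (hne : Z ≠ []) :
    2 ≤ Z.length ↔ Z.getLastD d ≠ Z.headD d := by
  match Z with
  | [] => exact absurd rfl hne
  | [a] => simp
  | a :: b :: r =>
    constructor
    · intro _
      have hmem : (b :: r).getLastD a ∈ b :: r := by
        rw [List.getLastD_eq_getLast?, List.getLast?_eq_some_getLast (by simp)]
        exact List.getLast_mem _
      have := (List.pairwise_cons.mp hZ).1 _ hmem
      simp only [List.getLastD_cons, List.headD_cons] at this ⊢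
      omega
    · intro _; simp

-- ===== VERDICT (by name: the statement is the Claim_ definition above) =====
theorem identify_empty_spec : Claim_equal_identify_empty := by
  intro state _
  show identify_empty state = identify_empty_alt state
  unfold identify_empty identify_empty_alt
  rw [pvFold_unset (PySem.List.enumerate state 0) (pvEnum_pos state)]
  by_cases hm : (0 : Int) ∈ state
  · have hZ : pvZeros (PySem.List.enumerate state 0) ≠ [] := by
      rw [ne_eq, pvZeros_nil_iff]; simpa using hm
    obtain ⟨k, hk⟩ := Option.isSome_iff_exists.mp
      ((PySem.List.index?_isSome_iff (xs := state) (v := 0)).mpr hm)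
    have hmr : (0 : Int) ∈ state.reverse := by simpa using hm
    obtain ⟨k', hk'⟩ := Option.isSome_iff_exists.mp
      ((PySem.List.index?_isSome_iff (xs := state.reverse) (v := 0)).mpr hmr)
    have hhead : (pvZeros (PySem.List.enumerate state 0)).headD (-1) = (k : Int) := by
      rw [pvZeros_head, hk]; simp
    have hlast : (pvZeros (PySem.List.enumerate state 0)).getLastD (-1)
        = (state.length : Int) - 1 - (k' : Int) := by
      rw [pvZeros_last, hk']; push_cast; ring
    have h2 := pvLen2_iff _ (-1) (pvZeros_sorted state 0) hZ
    simp only [hm, not_true_eq_false, if_false, hk, hk', Option.getD_some, hZ, if_true, ne_eq,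
      not_false_eq_true]
    rw [Prod.mk.injEq]
    constructor
    · exact hhead
    · by_cases hlen : 2 ≤ (pvZeros (PySem.List.enumerate state 0)).length
      · have hne := h2.mp hlen
        rw [hhead, hlast] at hne
        rw [if_pos hlen, if_pos hne]
        exact hlast
      · have heq : ¬ ((pvZeros (PySem.List.enumerate state 0)).getLastD (-1)
            ≠ (pvZeros (PySem.List.enumerate state 0)).headD (-1)) := fun h => hlen (h2.mpr h)
        rw [not_not] at heq
        rw [hhead, hlast] at heq
        rw [if_neg hlen, if_neg (not_not_intro heq)]
  · have hZ : pvZeros (PySem.List.enumerate state 0) = [] := (pvZeros_nil_iff state 0).mpr hm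
    simp [hZ, hm]
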